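-- pv_equiv track=rewrite | github.com/Nghia03092004/nghia03092004.github.io | project_euler_unified/problem_839/solution.py | beans_dp
-- ===== SOURCE A (Python) =====
-- def beans_dp(n: int, k: int, m: int):
--     """DP approach with prefix-sum optimization."""
--     # dp[s] = number of ways to fill first i bowls to sum s
--     dp = [0] * (n + 1)
--     dp[0] = 1
--     for _ in range(k):
--         new_dp = [0] * (n + 1)
--         prefix = [0] * (n + 2)
--         for s in range(n + 1):
--             prefix[s + 1] = prefix[s] + dp[s]
--         for s in range(n + 1):
--             lo = max(0, s - m)
--             new_dp[s] = prefix[s + 1] - prefix[lo]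
--         dp = new_dp
--     return dp[n]
-- ===== SOURCE B (Python) =====
-- def _comb(a, b):
--     if b < 0 or b > a:
--         return 0
--     c = min(b, a - b)
--     r = 1
--     for i in range(1, c + 1):
--         r = r * (a - c + i) // i
--     return r
--
--
-- def beans_dp(n: int, k: int, m: int):
--     """Closed form: inclusion-exclusion over the bowls forced above m."""
--     if k <= 0:
--         return 1 if n == 0 else 0
--     if m < 0:
--         return 0
--     total, sign, j = 0, 1, 0
--     while j <= k and j * (m + 1) <= n:
--         total += sign * _comb(k, j) * _comb(n - j * (m + 1) + k - 1, k - 1)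
--         sign = -sign
--         j += 1
--     return total
-- ===== Notes on version B (the rewrite author's own statement) =====
-- stated objective: faster
-- what changed: Replaced the O(k*n) prefix-sum DP over k rows by the inclusion-exclusion closed form sum_j (-1)^j C(k,j) C(n-j(m+1)+k-1,k-1), evaluated with a multiplicative binomial routine over at most min(k, n/(m+1))+1 terms.
import Mathlib
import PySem

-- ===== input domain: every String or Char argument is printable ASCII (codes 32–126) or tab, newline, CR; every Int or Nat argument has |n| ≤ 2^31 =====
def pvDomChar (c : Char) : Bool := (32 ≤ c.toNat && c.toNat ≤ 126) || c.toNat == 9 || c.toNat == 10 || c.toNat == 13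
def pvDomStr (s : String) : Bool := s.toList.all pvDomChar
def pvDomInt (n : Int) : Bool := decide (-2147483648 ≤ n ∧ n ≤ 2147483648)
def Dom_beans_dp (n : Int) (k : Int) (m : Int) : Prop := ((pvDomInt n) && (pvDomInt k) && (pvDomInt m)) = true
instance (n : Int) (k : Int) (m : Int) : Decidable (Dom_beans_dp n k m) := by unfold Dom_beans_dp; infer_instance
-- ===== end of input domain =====

-- B replaces A's O(k*n) prefix-sum DP by the inclusion-exclusion closed form
-- sum_j (-1)^j C(k,j) C(n-j(m+1)+k-1, k-1): a different algorithm, measurably faster.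

-- ===== PORT A =====
-- transliteration of A: dp/new_dp/prefix are Int lists updated by index writes
-- (List.set); an index read in A is always in range on Pre_, ported as getD _ 0.
def beans_dp (n : Int) (k : Int) (m : Int) : Int :=
  let dp0 : List Int := (List.replicate (n + 1).toNat 0).set 0 1   -- dp = [0]*(n+1); dp[0] = 1
  let dp := (List.range k.toNat).foldl (fun dp _ =>                -- for _ in range(k):
    let pre := (List.range (n + 1).toNat).foldl                    --   prefix[s+1] = prefix[s] + dp[s]
      (fun pre s => pre.set (s + 1) (pre.getD s 0 + dp.getD s 0))
      (List.replicate (n + 2).toNat 0)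
    let new_dp := (List.range (n + 1).toNat).foldl                 --   new_dp[s] = prefix[s+1] - prefix[lo]
      (fun nd s => nd.set s (pre.getD (s + 1) 0 - pre.getD (max 0 ((s : Int) - m)).toNat 0))
      (List.replicate (n + 1).toNat 0)
    new_dp) dp0
  dp.getD n.toNat 0                                                -- return dp[n]

-- ===== PORT B =====
-- transliteration of _comb: multiplicative binomial with exact integer division
def pyComb (a : Int) (b : Int) : Int :=
  if b < 0 ∨ b > a then 0
  else
    let c := min b (a - b)
    (PySem.List.pyRange 1 (c + 1) 1).foldl                         -- for i in range(1, c + 1):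
      (fun r i => PySem.Int.floordiv (r * (a - c + i)) i) 1        --   r = r * (a - c + i) // i

-- the while loop of B; fuel bounds the iteration count (the loop runs at most k+1 times)
def altLoop (n : Int) (k : Int) (m : Int) : Nat → Int → Int → Int → Int
  | 0, _, total, _ => total
  | fuel + 1, j, total, sign =>
    if j ≤ k ∧ j * (m + 1) ≤ n then
      altLoop n k m fuel (j + 1)
        (total + sign * pyComb k j * pyComb (n - j * (m + 1) + k - 1) (k - 1)) (-sign)
    else total

def beans_dp_alt (n : Int) (k : Int) (m : Int) : Int :=
  if k ≤ 0 then (if n = 0 then 1 else 0)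
  else if m < 0 then 0
  else altLoop n k m (k.toNat + 1) 0 0 1

-- ===== PRECONDITION & SPEC =====
-- Pre_ is exactly the set of inputs on which the Python A returns: outside it A raises
-- IndexError (dp[0] = 1 on the empty list when n < 0, or prefix[lo] with lo > n+1 when
-- k ≥ 1 and m ≤ -2).
def Pre_beans_dp (n : Int) (k : Int) (m : Int) : Prop := 0 ≤ n ∧ (-1 ≤ m ∨ k ≤ 0)
instance (n : Int) (k : Int) (m : Int) : Decidable (Pre_beans_dp n k m) := by unfold Pre_beans_dp; infer_instance
def pvWitness_beans_dp : Int × Int × Int := (5, 3, 2)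

def Spec_beans_dp (n : Int) (k : Int) (m : Int) (out : Int) : Prop := out = beans_dp_alt n k m
instance (n : Int) (k : Int) (m : Int) (out : Int) : Decidable (Spec_beans_dp n k m out) := by unfold Spec_beans_dp; infer_instance

-- ===== CLAIM (what is proved, stated in full; the proofs are below) =====
def Claim_equal_beans_dp : Prop := ∀ (n : Int) (k : Int) (m : Int), Dom_beans_dp n k m → Pre_beans_dp n k m → Spec_beans_dp n k m (beans_dp n k m)

-- ===== LEMMAS AND PROOFS =====

lemma getD_set_self' (l : List Int) (i : Nat) (x : Int) (h : i < l.length) :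
    (l.set i x).getD i 0 = x := by
  simp [List.getD, h]

lemma getD_set_ne' (l : List Int) (i t : Nat) (x : Int) (h : t ≠ i) :
    (l.set i x).getD t 0 = l.getD t 0 := by
  simp [List.getD, List.getElem?_set_ne (Ne.symm h)]

lemma getD_replicate_zero (L t : Nat) : (List.replicate L (0 : Int)).getD t 0 = 0 := by
  simp [List.getD]

-- partial sums of dp as read by getD
def psum (dp : List Int) (t : Nat) : Int := ((List.range t).map (fun u => dp.getD u 0)).sum

lemma psum_succ (dp : List Int) (t : Nat) :
    psum dp (t + 1) = psum dp t + dp.getD t 0 := by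
  simp [psum, List.range_succ]

-- A's prefix list for a given row dp (identical term to the `let pre` in beans_dp)
def prefixList (dp : List Int) (N : Nat) : List Int :=
  (List.range (N + 1)).foldl
    (fun pre s => pre.set (s + 1) (pre.getD s 0 + dp.getD s 0))
    (List.replicate (N + 2) 0)

lemma prefixAux_len (dp : List Int) (N j : Nat) :
    ((List.range j).foldl (fun pre s => pre.set (s + 1) (pre.getD s 0 + dp.getD s 0))
      (List.replicate (N + 2) 0)).length = N + 2 := by
  induction j with
  | zero => simp
  | succ j ih =>
    rw [List.range_succ, List.foldl_append]
    simpa using ih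

lemma prefixAux_spec (dp : List Int) (N : Nat) :
    ∀ j, j ≤ N + 1 → ∀ t,
      ((List.range j).foldl (fun pre s => pre.set (s + 1) (pre.getD s 0 + dp.getD s 0))
        (List.replicate (N + 2) 0)).getD t 0 = if t ≤ j then psum dp t else 0 := by
  intro j
  induction j with
  | zero =>
    intro _ t
    simp only [List.range_zero, List.foldl_nil]
    rw [getD_replicate_zero]
    rcases Nat.eq_zero_or_pos t with h | h
    · subst h; simp [psum]
    · simp [Nat.pos_iff_ne_zero.mp h]
  | succ j ih =>
    intro hj t
    rw [List.range_succ, List.foldl_append, List.foldl_cons, List.foldl_nil]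
    by_cases ht : t = j + 1
    · subst ht
      rw [getD_set_self' _ _ _ (by rw [prefixAux_len]; omega)]
      rw [ih (by omega) j, if_pos le_rfl, psum_succ]
      simp
    · rw [getD_set_ne' _ _ _ _ ht, ih (by omega) t]
      by_cases h1 : t ≤ j
      · rw [if_pos h1, if_pos (by omega)]
      · rw [if_neg h1, if_neg (by omega)]

lemma prefixList_spec (dp : List Int) (N t : Nat) (h : t ≤ N + 1) :
    (prefixList dp N).getD t 0 = psum dp t := by
  rw [prefixList, prefixAux_spec dp N (N + 1) le_rfl t, if_pos h]

lemma newdpAux_len (g : Nat → Int) (N j : Nat) :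
    ((List.range j).foldl (fun nd s => nd.set s (g s))
      (List.replicate (N + 1) 0)).length = N + 1 := by
  induction j with
  | zero => simp
  | succ j ih =>
    rw [List.range_succ, List.foldl_append]
    simpa using ih

lemma newdpAux_spec (g : Nat → Int) (N : Nat) :
    ∀ j, j ≤ N + 1 → ∀ t,
      ((List.range j).foldl (fun nd s => nd.set s (g s))
        (List.replicate (N + 1) 0)).getD t 0 = if t < j then g t else 0 := by
  intro j
  induction j with
  | zero =>
    intro _ t
    simp only [List.range_zero, List.foldl_nil]
    simp
  | succ j ih =>
    intro hj t
    rw [List.range_succ, List.foldl_append, List.foldl_cons, List.foldl_nil]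
    by_cases ht : t = j
    · subst ht
      rw [getD_set_self' _ _ _ (by rw [newdpAux_len]; omega)]
      rw [if_pos (by omega)]
    · rw [getD_set_ne' _ _ _ _ ht, ih (by omega) t]
      by_cases h1 : t < j
      · rw [if_pos h1, if_pos (by omega)]
      · rw [if_neg h1, if_neg (by omega)]

lemma window_sum (a : Nat → Int) :
    ∀ (d : Nat) (s lo : Nat), lo + d = s + 1 →
      ((List.range d).map (fun v => a (s - v))).sum
        = ((List.range (s + 1)).map a).sum - ((List.range lo).map a).sum := by
  intro d
  induction d with
  | zero =>
    intro s lo h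
    have : lo = s + 1 := by omega
    subst this; simp
  | succ d ih =>
    intro s lo h
    rw [List.range_succ, List.map_append, List.sum_append]
    rw [ih s (lo + 1) (by omega)]
    have h1 : s - d = lo := by omega
    simp only [List.map_cons, List.map_nil, List.sum_cons, List.sum_nil, h1]
    have h2 : ((List.range (lo + 1)).map a).sum = ((List.range lo).map a).sum + a lo := by
      simp [List.range_succ]
    rw [h2]
    ring

-- Nat-indexed form of the rows A's loop produces
def rowN (m : Int) (N : Nat) : Nat → List Int
  | 0 => 1 :: List.replicate N 0
  | i + 1 =>
    (List.range (N + 1)).map (fun (s : Nat) =>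
      ((List.range (min m (s : Int) + 1).toNat).map
        (fun (v : Nat) => (rowN m N i).getD (s - v) 0)).sum)

lemma rowN_len_succ (m : Int) (N i : Nat) : (rowN m N (i + 1)).length = N + 1 := by
  simp [rowN]

-- one A-iteration equals one rowN construction, pointwise through getD
lemma body_getD (m : Int) (hm : -1 ≤ m) (N : Nat) (dp : List Int) (t : Nat) :
    ((List.range (N + 1)).foldl
      (fun nd s => nd.set s ((prefixList dp N).getD (s + 1) 0
        - (prefixList dp N).getD (max 0 ((s : Int) - m)).toNat 0))
      (List.replicate (N + 1) 0)).getD t 0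
    = if t < N + 1 then
        ((List.range (min m (t : Int) + 1).toNat).map (fun (v : Nat) => dp.getD (t - v) 0)).sum
      else 0 := by
  rw [newdpAux_spec _ N (N + 1) le_rfl t]
  by_cases ht : t < N + 1
  · rw [if_pos ht, if_pos ht]
    rw [prefixList_spec dp N (t + 1) (by omega),
        prefixList_spec dp N _ (by omega)]
    rw [window_sum (fun u => dp.getD u 0) ((min m (t : Int) + 1).toNat)
        t ((max 0 ((t : Int) - m)).toNat) (by omega)]
    rfl
  · rw [if_neg ht, if_neg ht]

-- the A-fold after i iterations is rowN i, pointwise through getD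
lemma rows_eq (m : Int) (hm : -1 ≤ m) (N : Nat) (i : Nat) : ∀ t,
    ((List.range i).foldl (fun dp _ =>
      (List.range (N + 1)).foldl
        (fun nd s => nd.set s
          (((List.range (N + 1)).foldl
              (fun pre s => pre.set (s + 1) (pre.getD s 0 + dp.getD s 0))
              (List.replicate (N + 2) 0)).getD (s + 1) 0
           - ((List.range (N + 1)).foldl
              (fun pre s => pre.set (s + 1) (pre.getD s 0 + dp.getD s 0))
              (List.replicate (N + 2) 0)).getD (max 0 ((s : Int) - m)).toNat 0))
        (List.replicate (N + 1) 0))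
      ((List.replicate (N + 1) 0).set 0 1)).getD t 0
    = (rowN m N i).getD t 0 := by
  induction i with
  | zero =>
    intro t
    simp [rowN, List.replicate_succ]
  | succ i ih =>
    intro t
    rw [show List.range (i + 1) = List.range i ++ [i] from List.range_succ,
        List.foldl_append, List.foldl_cons, List.foldl_nil]
    have hb := body_getD m hm N
      ((List.range i).foldl (fun dp _ =>
        (List.range (N + 1)).foldl
          (fun nd s => nd.set s
            (((List.range (N + 1)).foldl
                (fun pre s => pre.set (s + 1) (pre.getD s 0 + dp.getD s 0))
                (List.replicate (N + 2) 0)).getD (s + 1) 0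
             - ((List.range (N + 1)).foldl
                (fun pre s => pre.set (s + 1) (pre.getD s 0 + dp.getD s 0))
                (List.replicate (N + 2) 0)).getD (max 0 ((s : Int) - m)).toNat 0))
          (List.replicate (N + 1) 0))
        ((List.replicate (N + 1) 0).set 0 1)) t
    simp only [prefixList] at hb
    rw [hb]
    by_cases ht : t < N + 1
    · rw [if_pos ht]
      simp only [ih]
      rw [show (rowN m N (i + 1)) = (List.range (N + 1)).map (fun (s : Nat) =>
        ((List.range (min m (s : Int) + 1).toNat).map
          (fun (v : Nat) => (rowN m N i).getD (s - v) 0)).sum) from rfl]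
      rw [PySem.List.getD_map_range _ _ _ _ ht]
    · rw [if_neg ht]
      rw [List.getD_eq_default _ _ (by rw [rowN_len_succ]; omega)]

-- ===== mathematical bridge: W (what A computes) = F (what B computes) =====

-- extended binomial coefficient: C(a, b) for integers, 0 outside 0 ≤ b ≤ a
def binom (a b : Int) : Int :=
  if 0 ≤ b ∧ b ≤ a then ((a.toNat.choose b.toNat : Nat) : Int) else 0

lemma binom_of_lt (a b : Int) (h : a < b) : binom a b = 0 := by
  unfold binom; rw [if_neg (by omega)]

lemma binom_zero_right (a : Int) : binom a 0 = if 0 ≤ a then 1 else 0 := by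
  unfold binom
  by_cases h : 0 ≤ a <;> simp [h]

lemma binom_pascal (a b : Int) (hb : 1 ≤ b) :
    binom a b = binom (a - 1) (b - 1) + binom (a - 1) b := by
  unfold binom
  rcases lt_trichotomy a b with h | h | h
  · rw [if_neg (by omega), if_neg (by omega), if_neg (by omega)]
    ring
  · subst h
    rw [if_pos (by omega), if_pos (by omega), if_neg (by omega)]
    simp
  · rw [if_pos (by omega), if_pos (by omega), if_pos (by omega)]
    have h1 : a.toNat = (a - 1).toNat + 1 := by omega
    have h2 : b.toNat = (b - 1).toNat + 1 := by omega
    rw [h1, h2, Nat.choose_succ_succ]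
    push_cast
    ring

-- the count A computes: W m i s = number of ways to fill i bowls 0..m summing to s
def W (m : Int) : Nat → Int → Int
  | 0, s => if s = 0 then 1 else 0
  | i + 1, s => ∑ v ∈ Finset.range (min m s + 1).toNat, W m i (s - (v : Int))

lemma W_neg (m : Int) : ∀ i (s : Int), s < 0 → W m i s = 0 := by
  intro i
  induction i with
  | zero => intro s hs; simp [W]; omega
  | succ i ih =>
    intro s hs
    rw [show W m (i + 1) s = ∑ v ∈ Finset.range (min m s + 1).toNat, W m i (s - (v : Int)) from rfl]
    have : (min m s + 1).toNat = 0 := by omega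
    rw [this]
    simp

lemma W_zero (m : Int) (hm : 0 ≤ m) : ∀ i, W m i 0 = 1 := by
  intro i
  induction i with
  | zero => simp [W]
  | succ i ih =>
    rw [show W m (i + 1) 0 = ∑ v ∈ Finset.range (min m 0 + 1).toNat, W m i (0 - (v : Int)) from rfl]
    have : (min m 0 + 1).toNat = 1 := by omega
    rw [this]
    simpa using ih

lemma binom_self (a : Int) (h : 0 ≤ a) : binom a a = 1 := by
  unfold binom
  rw [if_pos (by omega)]
  simp

-- bridge: sums of mapped ranges are Finset range sums
lemma sum_map_range_eq (f : Nat → Int) (n : Nat) :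
    ((List.range n).map f).sum = ∑ i ∈ Finset.range n, f i := by
  induction n with
  | zero => simp
  | succ n ih =>
    rw [List.range_succ, List.map_append, List.sum_append, Finset.sum_range_succ, ih]
    simp

lemma W_rec (m : Int) (hm : 0 ≤ m) (i : Nat) (n : Int) (hn : 1 ≤ n) :
    W m (i + 1) n = W m (i + 1) (n - 1) + W m i n - W m i (n - (m + 1)) := by
  have hrw : ∀ v : Nat, W m i (n - 1 - (v : Int)) = W m i (n - ((v + 1 : Nat) : Int)) := by
    intro v; congr 1; push_cast; ring
  rw [show W m (i + 1) n = ∑ v ∈ Finset.range (min m n + 1).toNat, W m i (n - (v : Int)) from rfl,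
      show W m (i + 1) (n - 1)
        = ∑ v ∈ Finset.range (min m (n - 1) + 1).toNat, W m i (n - 1 - (v : Int)) from rfl]
  simp only [hrw]
  have hshift := Finset.sum_range_succ' (fun v : Nat => W m i (n - (v : Int)))
    ((min m (n - 1) + 1).toNat)
  by_cases hmn : m ≤ n - 1
  · have e1 : (min m n + 1).toNat = (min m (n - 1) + 1).toNat := by omega
    have e2 : n - (m + 1) = n - (((min m (n - 1) + 1).toNat : Nat) : Int) := by
      have : (((min m (n - 1) + 1).toNat : Nat) : Int) = m + 1 := by omega
      rw [this]
    rw [e1, e2]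
    have hsucc := Finset.sum_range_succ (fun v : Nat => W m i (n - (v : Int)))
      ((min m (n - 1) + 1).toNat)
    simp only [Nat.cast_zero, sub_zero] at hshift hsucc ⊢
    linarith
  · have e1 : (min m n + 1).toNat = (min m (n - 1) + 1).toNat + 1 := by omega
    have e2 : W m i (n - (m + 1)) = 0 := W_neg m i _ (by omega)
    rw [e1, e2]
    simp only [Nat.cast_zero, sub_zero] at hshift ⊢
    linarith

-- the sum B computes (in closed form over Nat index K)
def F (m : Int) (K : Nat) (n : Int) : Int :=
  ∑ j ∈ Finset.range (K + 1),
    (-1 : Int) ^ j * (K.choose j : Int) * binom (n - (j : Int) * (m + 1) + (K : Int) - 1) ((K : Int) - 1)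

lemma F_neg (m : Int) (hm : 0 ≤ m) (K : Nat) (_hK : 1 ≤ K) (n : Int) (hn : n < 0) :
    F m K n = 0 := by
  unfold F
  apply Finset.sum_eq_zero
  intro j _
  have hj : 0 ≤ ((j : Int)) * (m + 1) := by positivity
  rw [binom_of_lt _ _ (by omega)]
  ring

lemma F_zero (m : Int) (hm : 0 ≤ m) (K : Nat) (_hK : 1 ≤ K) : F m K 0 = 1 := by
  unfold F
  rw [Finset.sum_eq_single 0]
  · have e : (0 : Int) - ((0 : Nat) : Int) * (m + 1) + (K : Int) - 1 = (K : Int) - 1 := by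
      push_cast; ring
    rw [e, binom_self _ (by omega)]
    simp
  · intro j _ hj0
    have hj1 : 1 ≤ (j : Int) := by exact_mod_cast Nat.one_le_iff_ne_zero.mpr hj0
    have hj : (1 : Int) * 1 ≤ ((j : Int)) * (m + 1) := by
      apply mul_le_mul hj1 (by omega) (by omega) (by omega)
    rw [binom_of_lt _ _ (by omega)]
    ring
  · intro h
    exact absurd (Finset.mem_range.mpr (by omega)) h

lemma F_succ_form (m : Int) (K : Nat) (n : Int) :
    F m (K + 1) n = ∑ j ∈ Finset.range (K + 2),
      (-1 : Int) ^ j * ((K + 1).choose j : Int) * binom (n - (j : Int) * (m + 1) + (K : Int)) (K : Int) := by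
  unfold F
  apply Finset.sum_congr rfl
  intro j _
  have e1 : n - (j : Int) * (m + 1) + ((K + 1 : Nat) : Int) - 1 = n - (j : Int) * (m + 1) + (K : Int) := by
    push_cast; ring
  have e2 : ((K + 1 : Nat) : Int) - 1 = (K : Int) := by push_cast; ring
  rw [e1, e2]

-- alternating Pascal reindexing, for any coefficient function B
lemma alt_pascal_sum (K : Nat) (B : Nat → Int) :
    ∑ j ∈ Finset.range (K + 2), (-1 : Int) ^ j * ((K + 1).choose j : Int) * B j
      = ∑ j ∈ Finset.range (K + 1), (-1 : Int) ^ j * (K.choose j : Int) * B j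
        - ∑ j ∈ Finset.range (K + 1), (-1 : Int) ^ j * (K.choose j : Int) * B (j + 1) := by
  rw [Finset.sum_range_succ' (fun j => (-1 : Int) ^ j * ((K + 1).choose j : Int) * B j) (K + 1)]
  have e1 : ∀ j, (-1 : Int) ^ (j + 1) * ((K + 1).choose (j + 1) : Int) * B (j + 1)
      = -((-1 : Int) ^ j * (K.choose j : Int) * B (j + 1))
        + (-1 : Int) ^ (j + 1) * (K.choose (j + 1) : Int) * B (j + 1) := by
    intro j
    rw [Nat.choose_succ_succ]
    push_cast
    ring
  simp only [e1]
  rw [Finset.sum_add_distrib]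
  have e4 : ∑ j ∈ Finset.range (K + 1), (-1 : Int) ^ (j + 1) * (K.choose (j + 1) : Int) * B (j + 1)
      = ∑ j ∈ Finset.range (K + 2), (-1 : Int) ^ j * (K.choose j : Int) * B j - B 0 := by
    rw [Finset.sum_range_succ' (fun j => (-1 : Int) ^ j * (K.choose j : Int) * B j) (K + 1)]
    simp
  have e5 : ∑ j ∈ Finset.range (K + 2), (-1 : Int) ^ j * (K.choose j : Int) * B j
      = ∑ j ∈ Finset.range (K + 1), (-1 : Int) ^ j * (K.choose j : Int) * B j := by
    rw [Finset.sum_range_succ]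
    simp [Nat.choose_succ_self]
  rw [e4, e5, Finset.sum_neg_distrib]
  simp
  ring

lemma F_rec (m : Int) (_hm : 0 ≤ m) (K : Nat) (hK : 1 ≤ K) (n : Int) :
    F m (K + 1) n = F m (K + 1) (n - 1) + F m K n - F m K (n - (m + 1)) := by
  have hKi : (1 : Int) ≤ (K : Int) := by exact_mod_cast hK
  have hA1 : F m (K + 1) n - F m (K + 1) (n - 1)
      = ∑ j ∈ Finset.range (K + 2), (-1 : Int) ^ j * ((K + 1).choose j : Int)
          * binom (n - (j : Int) * (m + 1) + (K : Int) - 1) ((K : Int) - 1) := by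
    rw [F_succ_form, F_succ_form, ← Finset.sum_sub_distrib]
    apply Finset.sum_congr rfl
    intro j _
    have e1 : n - 1 - (j : Int) * (m + 1) + (K : Int) = (n - (j : Int) * (m + 1) + (K : Int)) - 1 := by
      ring
    have e2 : n - (j : Int) * (m + 1) + (K : Int) - 1 = (n - (j : Int) * (m + 1) + (K : Int)) - 1 := by
      ring
    rw [e1, e2, binom_pascal (n - (j : Int) * (m + 1) + (K : Int)) (K : Int) hKi]
    ring
  have hFm : F m K (n - (m + 1)) = ∑ j ∈ Finset.range (K + 1),
      (-1 : Int) ^ j * (K.choose j : Int)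
        * binom (n - ((j + 1 : Nat) : Int) * (m + 1) + (K : Int) - 1) ((K : Int) - 1) := by
    unfold F
    apply Finset.sum_congr rfl
    intro j _
    have e : n - (m + 1) - (j : Int) * (m + 1) + (K : Int) - 1
        = n - ((j + 1 : Nat) : Int) * (m + 1) + (K : Int) - 1 := by push_cast; ring
    rw [e]
  have hFn : F m K n = ∑ j ∈ Finset.range (K + 1),
      (-1 : Int) ^ j * (K.choose j : Int)
        * binom (n - (j : Int) * (m + 1) + (K : Int) - 1) ((K : Int) - 1) := rfl
  have hP := alt_pascal_sum K
    (fun j => binom (n - (j : Int) * (m + 1) + (K : Int) - 1) ((K : Int) - 1))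
  simp only [] at hP
  rw [hFn, hFm]
  -- combine: hA1 gives the big sum, hP decomposes it
  have := hA1
  rw [hP] at this
  linarith

lemma F_one (m : Int) (n : Int) :
    F m 1 n = binom n 0 - binom (n - (m + 1)) 0 := by
  unfold F
  rw [Finset.sum_range_succ, Finset.sum_range_one]
  have e1 : n - ((0 : Nat) : Int) * (m + 1) + ((1 : Nat) : Int) - 1 = n := by omega
  have e2 : n - ((1 : Nat) : Int) * (m + 1) + ((1 : Nat) : Int) - 1 = n - (m + 1) := by omega
  have e3 : ((1 : Nat) : Int) - 1 = 0 := by omega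
  rw [e1, e2, e3]
  simp
  ring

lemma W_one (m : Int) (hm : 0 ≤ m) (n : Int) : W m 1 n = F m 1 n := by
  rw [F_one]
  rw [show W m 1 n = ∑ v ∈ Finset.range (min m n + 1).toNat, W m 0 (n - (v : Int)) from rfl]
  simp only [show ∀ s : Int, W m 0 s = if s = 0 then 1 else 0 from fun _ => rfl]
  by_cases hn : 0 ≤ n
  · have hcond : ∀ v : Nat, (if n - (v : Int) = 0 then (1 : Int) else 0)
        = if v = n.toNat then 1 else 0 := by
      intro v
      by_cases hv : n - (v : Int) = 0
      · rw [if_pos hv, if_pos (by omega)]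
      · rw [if_neg hv, if_neg (by omega)]
    simp only [hcond]
    rw [Finset.sum_ite_eq' (Finset.range (min m n + 1).toNat) n.toNat (fun _ => (1 : Int))]
    rw [binom_zero_right, binom_zero_right, if_pos hn]
    by_cases hle : n ≤ m
    · rw [if_pos (Finset.mem_range.mpr (by omega))]
      rw [if_neg (show ¬ (0 : Int) ≤ n - (m + 1) by omega)]
      norm_num
    · rw [if_neg (by simp only [Finset.mem_range]; omega)]
      rw [if_pos (show (0 : Int) ≤ n - (m + 1) by omega)]
      norm_num
  · have : (min m n + 1).toNat = 0 := by omega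
    rw [this, binom_zero_right, binom_zero_right, if_neg hn, if_neg (by omega)]
    simp

lemma W_eq_F (m : Int) (hm : 0 ≤ m) : ∀ K, 1 ≤ K → ∀ n : Int, W m K n = F m K n := by
  intro K
  induction K with
  | zero => omega
  | succ K ihK =>
    intro _ n
    by_cases hK1 : K = 0
    · subst hK1
      exact W_one m hm n
    · have hK : 1 ≤ K := Nat.one_le_iff_ne_zero.mpr hK1
      have ihK' := ihK hK
      have main : ∀ N : Nat, ∀ n : Int, n ≤ (N : Int) → W m (K + 1) n = F m (K + 1) n := by
        intro N
        induction N with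
        | zero =>
          intro n hn
          rcases lt_or_eq_of_le hn with h | h
          · rw [W_neg m (K + 1) n (by omega), F_neg m hm (K + 1) (by omega) n (by omega)]
          · rw [h]
            push_cast
            rw [W_zero m hm (K + 1), F_zero m hm (K + 1) (by omega)]
        | succ N ihN =>
          intro n hn
          by_cases hn' : n ≤ (N : Int)
          · exact ihN n hn'
          · have hn1 : 1 ≤ n := by omega
            rw [W_rec m hm K n hn1, F_rec m hm K hK n]
            rw [ihN (n - 1) (by omega), ihK' n, ihK' (n - (m + 1))]
      exact main n.toNat n (by omega)

-- rowN read through getD is W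
lemma rowN_getD_eq_W (m : Int) (N : Nat) : ∀ i (t : Nat), t < N + 1 →
    (rowN m N i).getD t 0 = W m i (t : Int) := by
  intro i
  induction i with
  | zero =>
    intro t _
    rcases t with _ | t
    · simp [rowN, W]
    · rw [show rowN m N 0 = 1 :: List.replicate N 0 from rfl]
      rw [show (1 :: List.replicate N 0 : List Int).getD (t + 1) 0
            = (List.replicate N (0 : Int)).getD t 0 from rfl]
      rw [getD_replicate_zero]
      rw [show W m 0 ((t + 1 : Nat) : Int) = if ((t + 1 : Nat) : Int) = 0 then 1 else 0 from rfl]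
      rw [if_neg (by omega)]
  | succ i ih =>
    intro t ht
    rw [show (rowN m N (i + 1)) = (List.range (N + 1)).map (fun (s : Nat) =>
      ((List.range (min m (s : Int) + 1).toNat).map
        (fun (v : Nat) => (rowN m N i).getD (s - v) 0)).sum) from rfl]
    rw [PySem.List.getD_map_range _ _ _ _ ht]
    rw [show W m (i + 1) (t : Int)
      = ∑ v ∈ Finset.range (min m (t : Int) + 1).toNat, W m i ((t : Int) - (v : Int)) from rfl]
    rw [sum_map_range_eq]
    apply Finset.sum_congr rfl
    intro v hv
    have hv' : v ≤ t := by
      have := Finset.mem_range.mp hv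
      omega
    rw [ih (t - v) (by omega)]
    congr 1
    omega

-- rows are identically zero once m < 0 and at least one iteration ran
lemma rowN_getD_zero_of_neg (m : Int) (hm : m < 0) (N i t : Nat) :
    (rowN m N (i + 1)).getD t 0 = 0 := by
  rw [show (rowN m N (i + 1)) = (List.range (N + 1)).map (fun (s : Nat) =>
      ((List.range (min m (s : Int) + 1).toNat).map
        (fun (v : Nat) => (rowN m N i).getD (s - v) 0)).sum) from rfl]
  by_cases ht : t < N + 1
  · rw [PySem.List.getD_map_range _ _ _ _ ht]
    have : (min m (t : Int) + 1).toNat = 0 := by omega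
    rw [this]
    simp
  · rw [List.getD_eq_default _ _ (by simp; omega)]

-- the multiplicative loop of _comb builds binomial coefficients step by step
lemma comb_fold (a c : Int) (hc0 : 0 ≤ c) (hca : c ≤ a - c) :
    ∀ i : Nat, (i : Int) ≤ c →
      (PySem.List.pyRange 1 ((i : Int) + 1) 1).foldl
        (fun r x => PySem.Int.floordiv (r * (a - c + x)) x) 1
      = binom (a - c + (i : Int)) (i : Int) := by
  intro i
  induction i with
  | zero =>
    intro _
    rw [show PySem.List.pyRange 1 (((0 : Nat) : Int) + 1) 1 = [] from rfl, List.foldl_nil]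
    rw [show ((0 : Nat) : Int) = 0 from rfl, add_zero, binom_zero_right, if_pos (by omega)]
  | succ i ih =>
    intro hi
    have ecast : ((i + 1 : Nat) : Int) = (i : Int) + 1 := by push_cast; ring
    rw [ecast]
    rw [PySem.List.pyRange_one_succ_right (by omega), List.foldl_append,
        ih (by omega), List.foldl_cons, List.foldl_nil]
    have hmul : binom (a - c + (i : Int)) (i : Int) * (a - c + ((i : Int) + 1))
        = binom (a - c + ((i : Int) + 1)) ((i : Int) + 1) * ((i : Int) + 1) := by
      unfold binom
      rw [if_pos (by constructor <;> omega), if_pos (by constructor <;> omega)]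
      have hX : (a - c + ((i : Int) + 1)).toNat = (a - c + (i : Int)).toNat + 1 := by omega
      have hXi : (((i : Int) + 1)).toNat = i + 1 := by omega
      have hIt : ((i : Int)).toNat = i := by omega
      rw [hX, hXi, hIt]
      have hnat : (a - c + (i : Int)).toNat.choose i * ((a - c + (i : Int)).toNat + 1)
          = ((a - c + (i : Int)).toNat + 1).choose (i + 1) * (i + 1) := by
        have h := Nat.add_one_mul_choose_eq (a - c + (i : Int)).toNat i
        rw [Nat.mul_comm] at h
        exact h
      rw [show a - c + ((i : Int) + 1) = (((a - c + (i : Int)).toNat + 1 : Nat) : Int) by omega,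
          show (i : Int) + 1 = ((i + 1 : Nat) : Int) by push_cast; ring]
      exact_mod_cast hnat
    rw [hmul, PySem.Int.floordiv_eq_ediv_of_pos (by omega)]
    exact Int.mul_ediv_cancel _ (by omega)

-- _comb computes the extended binomial coefficient
lemma pyComb_eq_binom (a b : Int) : pyComb a b = binom a b := by
  unfold pyComb
  by_cases h : b < 0 ∨ b > a
  · rw [if_pos h]
    unfold binom
    rw [if_neg (by omega)]
  · rw [if_neg h]
    have hb0 : 0 ≤ b := by omega
    have hba : b ≤ a := by omega
    show (PySem.List.pyRange 1 (min b (a - b) + 1) 1).foldl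
      (fun r x => PySem.Int.floordiv (r * (a - min b (a - b) + x)) x) 1 = binom a b
    have hc0 : 0 ≤ min b (a - b) := by omega
    have hca : min b (a - b) ≤ a - min b (a - b) := by omega
    have hkey := comb_fold a (min b (a - b)) hc0 hca (min b (a - b)).toNat (by omega)
    rw [show (((min b (a - b)).toNat : Nat) : Int) = min b (a - b) by omega] at hkey
    rw [hkey, show a - min b (a - b) + min b (a - b) = a by ring]
    rcases min_cases b (a - b) with ⟨he, _⟩ | ⟨he, _⟩
    · rw [he]
    · rw [he]
      unfold binom
      rw [if_pos (by constructor <;> omega), if_pos (by constructor <;> omega)]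
      rw [show (a - b).toNat = a.toNat - b.toNat by omega, Nat.choose_symm (by omega)]

-- unrolling B's while loop
lemma altLoop_spec (n k m : Int) (hk : 1 ≤ k) (hm : 0 ≤ m) :
    ∀ (fuel : Nat) (j : Nat) (total : Int), fuel + j = k.toNat + 1 →
      altLoop n k m fuel (j : Int) total ((-1 : Int) ^ j)
        = total + ∑ i ∈ Finset.range fuel,
            (-1 : Int) ^ (j + i) * (k.toNat.choose (j + i) : Int)
              * binom (n - ((j + i : Nat) : Int) * (m + 1) + k - 1) (k - 1) := by
  intro fuel
  induction fuel with
  | zero =>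
    intro j total h
    simp [altLoop]
  | succ fuel ih =>
    intro j total h
    rw [show altLoop n k m (fuel + 1) (j : Int) total ((-1 : Int) ^ j)
        = if (j : Int) ≤ k ∧ (j : Int) * (m + 1) ≤ n then
            altLoop n k m fuel ((j : Int) + 1)
              (total + (-1 : Int) ^ j * pyComb k (j : Int)
                * pyComb (n - (j : Int) * (m + 1) + k - 1) (k - 1)) (-(-1 : Int) ^ j)
          else total from rfl]
    by_cases hcond : (j : Int) ≤ k ∧ (j : Int) * (m + 1) ≤ n
    · rw [if_pos hcond]
      rw [show ((j : Int) + 1) = ((j + 1 : Nat) : Int) by push_cast; ring,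
          show (-(-1 : Int) ^ j) = (-1 : Int) ^ (j + 1) by ring]
      rw [ih (j + 1) _ (by omega)]
      rw [Finset.sum_range_succ' (fun i => (-1 : Int) ^ (j + i) * (k.toNat.choose (j + i) : Int)
            * binom (n - ((j + i : Nat) : Int) * (m + 1) + k - 1) (k - 1)) fuel]
      have eidx : ∀ i : Nat, j + 1 + i = j + (i + 1) := by omega
      simp only [eidx]
      have hc1 : pyComb k (j : Int) = (k.toNat.choose (j + 0) : Int) := by
        rw [pyComb_eq_binom]
        unfold binom
        rw [if_pos (by constructor <;> omega)]
        norm_num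
      have hc2 : pyComb (n - (j : Int) * (m + 1) + k - 1) (k - 1)
          = binom (n - ((j + 0 : Nat) : Int) * (m + 1) + k - 1) (k - 1) := by
        rw [pyComb_eq_binom]
        norm_num
      rw [hc1, hc2]
      ring
    · rw [if_neg hcond]
      have hj : (j : Int) ≤ k := by omega
      have hmn : ¬ (j : Int) * (m + 1) ≤ n := fun hx => hcond ⟨hj, hx⟩
      rw [Finset.sum_eq_zero]
      · ring
      · intro i _
        have hle : (j : Int) * (m + 1) ≤ ((j + i : Nat) : Int) * (m + 1) := by
          have hji : (j : Int) ≤ ((j + i : Nat) : Int) := by push_cast; omega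
          exact mul_le_mul_of_nonneg_right hji (by omega)
        rw [binom_of_lt _ _ (by omega)]
        ring

-- ===== VERDICT (by name: the statement is the Claim_ definition above) =====
theorem beans_dp_spec : Claim_equal_beans_dp := by
  intro n k m _ hpre
  obtain ⟨hn, hmk⟩ := hpre
  have h1 : (n + 1).toNat = n.toNat + 1 := by omega
  have h2 : (n + 2).toNat = n.toNat + 2 := by omega
  unfold Spec_beans_dp
  by_cases hk : k ≤ 0
  · -- zero iterations on both sides
    have hk0 : k.toNat = 0 := by omega
    simp only [beans_dp, beans_dp_alt, if_pos hk, hk0, List.range_zero, List.foldl_nil]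
    rw [h1, List.replicate_succ]
    rcases Nat.eq_zero_or_pos n.toNat with h | h
    · rw [h]
      rw [if_pos (by omega)]
      rfl
    · rw [if_neg (by omega)]
      rw [show n.toNat = (n.toNat - 1) + 1 by omega]
      rw [List.set_cons_zero]
      rw [show ((1 : Int) :: List.replicate (n.toNat - 1 + 1) 0).getD ((n.toNat - 1) + 1) 0
            = (List.replicate (n.toNat - 1 + 1) (0 : Int)).getD (n.toNat - 1) 0 from rfl]
      rw [getD_replicate_zero]
  · have hk1 : 1 ≤ k := by omega
    have hm1 : -1 ≤ m := hmk.resolve_right hk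
    have hA : beans_dp n k m = (rowN m n.toNat k.toNat).getD n.toNat 0 := by
      simp only [beans_dp]
      rw [h1, h2]
      exact rows_eq m hm1 n.toNat k.toNat n.toNat
    by_cases hm0 : m < 0
    · rw [hA, show k.toNat = (k.toNat - 1) + 1 by omega,
          rowN_getD_zero_of_neg m hm0 n.toNat (k.toNat - 1) n.toNat]
      rw [show beans_dp_alt n k m = if k ≤ 0 then (if n = 0 then 1 else 0)
            else if m < 0 then 0 else altLoop n k m (k.toNat + 1) 0 0 1 from rfl,
          if_neg hk, if_pos hm0]
    · have hm' : 0 ≤ m := by omega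
      rw [hA, rowN_getD_eq_W m n.toNat k.toNat n.toNat (by omega)]
      rw [show ((n.toNat : Nat) : Int) = n by omega]
      rw [W_eq_F m hm' k.toNat (by omega) n]
      rw [show beans_dp_alt n k m = if k ≤ 0 then (if n = 0 then 1 else 0)
            else if m < 0 then 0 else altLoop n k m (k.toNat + 1) 0 0 1 from rfl,
          if_neg hk, if_neg hm0]
      have hspec := altLoop_spec n k m hk1 hm' (k.toNat + 1) 0 0 (by omega)
      rw [show ((0 : Nat) : Int) = 0 from rfl, show ((-1 : Int) ^ (0 : Nat)) = 1 from rfl] at hspec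
      rw [hspec, zero_add]
      unfold F
      rw [show ((k.toNat : Nat) : Int) = k by omega]
      apply Finset.sum_congr rfl
      intro j _
      rw [show (0 : Nat) + j = j by omega]
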